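-- pv_equiv track=rewrite | github.com/hhh5460/lotto | lotto.py | get_bs_text
-- ===== SOURCE A (Python) =====
-- def get_bs_text(num):
--     '''取号码的波色名'''
--     colors_names = '红绿蓝'
--     colors_numbers = [[1, 2, 7, 8, 12, 13, 18, 19, 23, 24, 29, 30, 34, 35, 40, 45, 46], # 红(17)
--                       [5, 6, 11, 16, 17, 21, 22, 27, 28, 32, 33, 38, 39, 43, 44, 49],   # 绿(16)
--                       [3, 4, 9, 10, 14, 15, 20, 25, 26, 31, 36, 37, 41, 42, 47, 48]]    # 篮(16)
--     for i, c in enumerate(colors_numbers):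
--         if num in c:
--             return colors_names[i]
-- ===== SOURCE B (Python) =====
-- # B: closed-form arithmetic; no lists, no table, no scan. Adding the decade index
-- # (num-1)//10 to num aligns the colors into fixed 2-wide bands modulo 12 that
-- # cycle red,blue,green, so the color is computed, not looked up.
-- def get_bs_text(num):
--     '''取号码的波色名'''
--     if 1 <= num <= 49:
--         return '红蓝绿'[((num + (num - 1) // 10 - 1) % 12 // 2) % 3]
-- ===== Notes on version B (the rewrite author's own statement) =====
-- stated objective: alternative
-- what changed: The membership-table scan is replaced by a closed-form arithmetic formula: num plus its decade index (num-1)//10 falls into fixed two-wide bands modulo twelve that cycle red/blue/green, so the color character is computed by integer arithmetic with no lists, scans or group branches.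
import Mathlib
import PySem

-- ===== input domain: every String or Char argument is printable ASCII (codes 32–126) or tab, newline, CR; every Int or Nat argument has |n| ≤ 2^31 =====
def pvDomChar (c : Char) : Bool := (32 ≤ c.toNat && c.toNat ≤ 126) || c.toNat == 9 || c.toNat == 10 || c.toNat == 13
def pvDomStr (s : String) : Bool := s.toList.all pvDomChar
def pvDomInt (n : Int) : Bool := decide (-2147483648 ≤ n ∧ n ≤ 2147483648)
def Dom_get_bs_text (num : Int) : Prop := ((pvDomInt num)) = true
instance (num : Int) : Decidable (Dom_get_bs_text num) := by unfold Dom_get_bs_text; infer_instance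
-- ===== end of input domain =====

-- B replaces A's three membership-scanned lists with a closed-form arithmetic formula
-- ((num + (num-1)//10 - 1) % 12 // 2) % 3 indexing the color string (alternative; no table).

-- ===== PORT A =====
-- the 'for i, c in enumerate(colors_numbers): if num in c: return colors_names[i]' loop
def pvLoopA (num : Int) (names : String) : List (Int × List Int) → Option String
  | [] => none
  | (i, c) :: rest =>
      if num ∈ c then (PySem.Str.pyGet? names i).map (fun ch => String.ofList [ch])
      else pvLoopA num names rest

def get_bs_text (num : Int) : Option String :=
  let colors_names := "红绿蓝"
  let colors_numbers : List (List Int) :=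
    [[1, 2, 7, 8, 12, 13, 18, 19, 23, 24, 29, 30, 34, 35, 40, 45, 46],
     [5, 6, 11, 16, 17, 21, 22, 27, 28, 32, 33, 38, 39, 43, 44, 49],
     [3, 4, 9, 10, 14, 15, 20, 25, 26, 31, 36, 37, 41, 42, 47, 48]]
  pvLoopA num colors_names (PySem.List.enumerate colors_numbers)

-- ===== PORT B =====
-- if 1 <= num <= 49: return '红蓝绿'[((num + (num - 1) // 10 - 1) % 12 // 2) % 3]
def get_bs_text_alt (num : Int) : Option String :=
  if 1 ≤ num ∧ num ≤ 49 then
    (PySem.Str.pyGet? "红蓝绿"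
        (PySem.Int.mod
          (PySem.Int.floordiv
            (PySem.Int.mod (num + PySem.Int.floordiv (num - 1) 10 - 1) 12) 2) 3)).map
      (fun ch => String.ofList [ch])
  else none

-- ===== PRECONDITION & SPEC =====
def Spec_get_bs_text (num : Int) (out : Option String) : Prop := out = get_bs_text_alt num
instance (num : Int) (out : Option String) : Decidable (Spec_get_bs_text num out) := by unfold Spec_get_bs_text; infer_instance

-- ===== CLAIM (what is proved, stated in full; the proofs are below) =====
def Claim_equal_get_bs_text : Prop := ∀ (num : Int), Dom_get_bs_text num → Spec_get_bs_text num (get_bs_text num)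

-- ===== LEMMAS AND PROOFS =====
set_option maxRecDepth 10000 in
set_option maxHeartbeats 1000000 in
theorem pvA_out_of_range (num : Int) (h : num < 1 ∨ 49 < num) :
    get_bs_text num = none := by
  simp only [get_bs_text, PySem.List.enumerate, pvLoopA]
  split_ifs with h1 h2 h3 <;> simp_all <;> omega

-- ===== VERDICT (by name: the statement is the Claim_ definition above) =====
set_option maxRecDepth 10000 in
set_option maxHeartbeats 1000000 in
theorem get_bs_text_spec : Claim_equal_get_bs_text := by
  intro num _
  unfold Spec_get_bs_text
  by_cases h : 1 ≤ num ∧ num ≤ 49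
  · obtain ⟨h1, h2⟩ := h
    interval_cases num <;> decide
  · rw [pvA_out_of_range num (by omega), get_bs_text_alt, if_neg h]
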